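-- pv_equiv track=rewrite | github.com/LucayG/GallicaEnv | Extraction_encyclopedie/script_extraction_encyclopedie.py | doublons_contexte
-- ===== SOURCE A (Python) =====
-- def doublons_contexte(liste_contexte, nb, doublons):
--     dico_doublons_contexte = {}
--     i=0
--     for elem in liste_contexte:
--         liste_temp = []
--         a = False
--         elem_split = elem.split()
--         for word in elem_split:
--             if a and word!='@@@':
--                 liste_temp.append(word)
--             if word == '@@@' and not a :
--                 a = True
--             elif word == '@@@':
--                 a = False
--         terme = ' '.join(liste_temp).strip()
--         if terme in doublons:
--             if terme not in dico_doublons_contexte.keys():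
--                 dico_doublons_contexte[terme] = {i : elem}
--             else:
--                 dico_doublons_contexte[terme][i] = elem
--             i+=1
--     return dico_doublons_contexte
-- ===== SOURCE B (Python) =====
-- def _take(tokens):
--     # inside a marker pair: keep everything up to the closing '@@@', then skip
--     if '@@@' in tokens:
--         k = tokens.index('@@@')
--         return tokens[:k] + _skip(tokens[k+1:])
--     return tokens
--
-- def _skip(tokens):
--     # outside markers: jump to the next '@@@' and start taking after it
--     if '@@@' in tokens:
--         k = tokens.index('@@@')
--         return _take(tokens[k+1:])
--     return []
--
-- def doublons_contexte(liste_contexte, nb, doublons):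
--     dico = {}
--     i = 0
--     for elem in liste_contexte:
--         terme = ' '.join(_skip(elem.split())).strip()
--         if terme in doublons:
--             dico.setdefault(terme, {})[i] = elem
--             i += 1
--     return dico
-- ===== Notes on version B (the rewrite author's own statement) =====
-- stated objective: alternative
-- what changed: The inner word-by-word boolean-flag scan that toggles on each '@@@' is replaced by a mutual jump recursion (_skip/_take) that locates each marker with list.index and slices the token list, and the if/else nested-dict build is replaced by dict.setdefault.
import Mathlib
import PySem

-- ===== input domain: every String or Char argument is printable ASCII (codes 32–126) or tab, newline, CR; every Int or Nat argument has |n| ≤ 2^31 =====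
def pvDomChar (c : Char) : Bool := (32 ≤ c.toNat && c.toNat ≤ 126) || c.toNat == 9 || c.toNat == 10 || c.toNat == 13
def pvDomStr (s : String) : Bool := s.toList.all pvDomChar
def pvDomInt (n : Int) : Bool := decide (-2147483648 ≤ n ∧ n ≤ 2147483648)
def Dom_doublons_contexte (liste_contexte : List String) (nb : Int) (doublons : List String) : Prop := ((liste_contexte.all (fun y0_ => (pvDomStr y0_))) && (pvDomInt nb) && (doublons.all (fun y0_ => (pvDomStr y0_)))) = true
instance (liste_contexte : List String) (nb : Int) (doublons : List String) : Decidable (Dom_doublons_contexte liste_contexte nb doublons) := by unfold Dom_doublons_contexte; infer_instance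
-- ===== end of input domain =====

-- B replaces A's word-by-word boolean-flag scan by a jump recursion that locates each '@@@'
-- marker with list.index and slices, and A's if/else dict build by dict.setdefault (objective:
-- alternative decomposition, same asymptotic cost).

-- ===== PORT A =====
-- inner for-loop body of A: state = (liste_temp, a)
def pvScanA (st : List String × Bool) (word : String) : List String × Bool :=
  let lt := if st.2 && !(word == "@@@") then st.1 ++ [word] else st.1
  let a := if word == "@@@" && !st.2 then true
           else if word == "@@@" then false
           else st.2
  (lt, a)

def doublons_contexte (liste_contexte : List String) (nb : Int) (doublons : List String) :
    List (String × List (Int × String)) :=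
  let fin := liste_contexte.foldl
    (fun (st : PySem.Dict String (PySem.Dict Int String) × Int) elem =>
      let p := (PySem.Str.split₀ elem).foldl pvScanA ([], false)
      let terme := PySem.Str.strip (PySem.Str.join " " p.1)
      if doublons.contains terme then
        (if !(st.1.contains terme) then
           st.1.insert terme (PySem.Dict.empty.insert st.2 elem)
         else
           st.1.modify terme PySem.Dict.empty (fun dd => dd.insert st.2 elem),
         st.2 + 1)
      else st)
    (PySem.Dict.empty, 0)
  fin.1.items.map (fun q => (q.1, q.2.items))

-- ===== PORT B =====
-- mutual jump recursion of Source B: _take keeps words up to the closing '@@@', _skip jumps past the next '@@@'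
mutual
def pvTake (tokens : List String) : List String :=
  if tokens.contains "@@@" then
    match h : PySem.List.index? tokens "@@@" with
    | some k =>
        PySem.List.slice tokens none (some (k : Int)) ++
          pvSkip (PySem.List.slice tokens (some ((k : Int) + 1)) none)
    | none => tokens   -- unreachable: contains = true gives index? = some _
  else tokens
termination_by tokens.length
decreasing_by
  obtain ⟨hk, -, -⟩ := PySem.List.getElem_of_index?_eq_some h
  have hcast : ((k : Int) + 1) = ((k + 1 : Nat) : Int) := by omega
  rw [hcast, PySem.List.slice_from_natCast, List.length_drop]
  omega

def pvSkip (tokens : List String) : List String :=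
  if tokens.contains "@@@" then
    match h : PySem.List.index? tokens "@@@" with
    | some k => pvTake (PySem.List.slice tokens (some ((k : Int) + 1)) none)
    | none => []   -- unreachable
  else []
termination_by tokens.length
decreasing_by
  obtain ⟨hk, -, -⟩ := PySem.List.getElem_of_index?_eq_some h
  have hcast : ((k : Int) + 1) = ((k + 1 : Nat) : Int) := by omega
  rw [hcast, PySem.List.slice_from_natCast, List.length_drop]
  omega
end

def doublons_contexte_alt (liste_contexte : List String) (nb : Int) (doublons : List String) :
    List (String × List (Int × String)) :=
  let fin := liste_contexte.foldl
    (fun (st : PySem.Dict String (PySem.Dict Int String) × Int) elem =>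
      let terme := PySem.Str.strip (PySem.Str.join " " (pvSkip (PySem.Str.split₀ elem)))
      if doublons.contains terme then
        ((st.1.setdefault terme PySem.Dict.empty).modify terme PySem.Dict.empty
           (fun dd => dd.insert st.2 elem),
         st.2 + 1)
      else st)
    (PySem.Dict.empty, 0)
  fin.1.items.map (fun q => (q.1, q.2.items))

-- ===== PRECONDITION & SPEC =====
def Spec_doublons_contexte (liste_contexte : List String) (nb : Int) (doublons : List String) (out : List (String × List (Int × String))) : Prop := out = doublons_contexte_alt liste_contexte nb doublons
instance (liste_contexte : List String) (nb : Int) (doublons : List String) (out : List (String × List (Int × String))) : Decidable (Spec_doublons_contexte liste_contexte nb doublons out) := by unfold Spec_doublons_contexte; infer_instance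

-- ===== CLAIM (what is proved, stated in full; the proofs are below) =====
def Claim_equal_doublons_contexte : Prop := ∀ (liste_contexte : List String) (nb : Int) (doublons : List String), Dom_doublons_contexte liste_contexte nb doublons → Spec_doublons_contexte liste_contexte nb doublons (doublons_contexte liste_contexte nb doublons)

-- ===== LEMMAS AND PROOFS =====

-- cons recurrences for the jump recursion
theorem pvSkip_nil : pvSkip [] = [] := by simp [pvSkip]

theorem pvTake_nil : pvTake [] = [] := by simp [pvTake]

theorem pvSkip_marker (ws : List String) : pvSkip ("@@@" :: ws) = pvTake ws := by
  rw [pvSkip, if_pos (by simp : (("@@@" :: ws).contains "@@@") = true)]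
  split
  case h_1 k hk =>
      rw [PySem.List.index?_cons_self] at hk
      obtain rfl : (0 : Nat) = k := Option.some.inj hk
      congr 1
      have hcast : ((0 : Nat) : Int) + 1 = ((1 : Nat) : Int) := by omega
      rw [hcast, PySem.List.slice_from_natCast]
      simp
  case h_2 hk => rw [PySem.List.index?_cons_self] at hk; cases hk

theorem pvTake_marker (ws : List String) : pvTake ("@@@" :: ws) = pvSkip ws := by
  rw [pvTake, if_pos (by simp : (("@@@" :: ws).contains "@@@") = true)]
  split
  case h_1 k hk =>
      rw [PySem.List.index?_cons_self] at hk
      obtain rfl : (0 : Nat) = k := Option.some.inj hk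
      have hcast : ((0 : Nat) : Int) + 1 = ((1 : Nat) : Int) := by omega
      rw [hcast, PySem.List.slice_from_natCast, PySem.List.slice_to_natCast]
      simp
  case h_2 hk => rw [PySem.List.index?_cons_self] at hk; cases hk

theorem pvSkip_cons_of_ne (w : String) (ws : List String) (hw : w ≠ "@@@") :
    pvSkip (w :: ws) = pvSkip ws := by
  have hbeq : (w == "@@@") = false := beq_eq_false_iff_ne.mpr hw
  rw [pvSkip, pvSkip]
  have hc : ((w :: ws).contains "@@@") = ws.contains "@@@" := by
    simp
    exact fun h => absurd h.symm hw
  rw [hc]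
  by_cases hm : ws.contains "@@@" = true
  · rw [if_pos hm, if_pos hm]
    split
    · next k hk =>
        split
        · next k' hk' =>
            rw [PySem.List.index?_cons_of_ne ws hw, hk'] at hk
            obtain rfl : k' + 1 = k := Option.some.inj hk
            congr 1
            have h1 : ((k' + 1 : Nat) : Int) + 1 = ((k' + 2 : Nat) : Int) := by omega
            have h2 : ((k' : Nat) : Int) + 1 = ((k' + 1 : Nat) : Int) := by omega
            rw [h1, h2, PySem.List.slice_from_natCast, PySem.List.slice_from_natCast]
            rfl
        · next hk' =>
            exact absurd (by simpa using hm) ((PySem.List.index?_eq_none_iff ws _).mp hk')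
    · next hk =>
        have : ("@@@" : String) ∉ w :: ws := (PySem.List.index?_eq_none_iff (w :: ws) _).mp hk
        exact absurd (List.mem_cons_of_mem w (by simpa using hm)) this
  · rw [if_neg hm, if_neg hm]

theorem pvTake_cons_of_ne (w : String) (ws : List String) (hw : w ≠ "@@@") :
    pvTake (w :: ws) = w :: pvTake ws := by
  have hbeq : (w == "@@@") = false := beq_eq_false_iff_ne.mpr hw
  rw [pvTake, pvTake]
  have hc : ((w :: ws).contains "@@@") = ws.contains "@@@" := by
    simp
    exact fun h => absurd h.symm hw
  rw [hc]
  by_cases hm : ws.contains "@@@" = true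
  · rw [if_pos hm, if_pos hm]
    split
    · next k hk =>
        split
        · next k' hk' =>
            rw [PySem.List.index?_cons_of_ne ws hw, hk'] at hk
            obtain rfl : k' + 1 = k := Option.some.inj hk
            have h1 : ((k' + 1 : Nat) : Int) + 1 = ((k' + 2 : Nat) : Int) := by omega
            have h2 : ((k' : Nat) : Int) + 1 = ((k' + 1 : Nat) : Int) := by omega
            rw [h1, h2, PySem.List.slice_from_natCast, PySem.List.slice_from_natCast,
                PySem.List.slice_to_natCast, PySem.List.slice_to_natCast]
            simp [List.drop_succ_cons, List.take_succ_cons]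
        · next hk' =>
            exact absurd (by simpa using hm) ((PySem.List.index?_eq_none_iff ws _).mp hk')
    · next hk =>
        have : ("@@@" : String) ∉ w :: ws := (PySem.List.index?_eq_none_iff (w :: ws) _).mp hk
        exact absurd (List.mem_cons_of_mem w (by simpa using hm)) this
  · rw [if_neg hm, if_neg hm]

-- A's flag scan computes exactly the jump recursion's result
theorem scan_eq_skip_take (ws : List String) :
    ∀ (acc : List String) (b : Bool),
      (ws.foldl pvScanA (acc, b)).1 = acc ++ (if b then pvTake ws else pvSkip ws) := by
  induction ws with
  | nil => intro acc b; cases b <;> simp [pvTake_nil, pvSkip_nil]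
  | cons w ws ih =>
    intro acc b
    by_cases hw : w = "@@@"
    · subst hw
      cases b <;>
        simp [List.foldl_cons, pvScanA, ih, pvSkip_marker, pvTake_marker]
    · have hbeq : (w == "@@@") = false := by simp [hw]
      cases b <;>
        simp [List.foldl_cons, pvScanA, hbeq, ih, pvSkip_cons_of_ne w ws hw,
              pvTake_cons_of_ne w ws hw, List.append_assoc]

-- the per-element dict update of A equals the setdefault-based one of B
theorem dict_step_eq (d : PySem.Dict String (PySem.Dict Int String)) (t : String)
    (i : Int) (elem : String) :
    (if !(d.contains t) then d.insert t (PySem.Dict.empty.insert i elem)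
     else d.modify t PySem.Dict.empty (fun dd => dd.insert i elem)) =
    (d.setdefault t PySem.Dict.empty).modify t PySem.Dict.empty (fun dd => dd.insert i elem) := by
  by_cases hc : d.contains t
  · rw [PySem.Dict.setdefault_of_contains d PySem.Dict.empty hc]
    simp [hc]
  · have hc' : d.contains t = false := by simpa using hc
    rw [PySem.Dict.setdefault_of_not_contains d PySem.Dict.empty hc']
    simp only [hc', Bool.not_false, if_true]
    show d.insert t (PySem.Dict.empty.insert i elem) =
      (d.insert t PySem.Dict.empty).insert t
        (((d.insert t PySem.Dict.empty).getD t PySem.Dict.empty).insert i elem)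
    rw [PySem.Dict.getD_insert_self, PySem.Dict.insert_insert_self]

-- ===== VERDICT (by name: the statement is the Claim_ definition above) =====
theorem doublons_contexte_spec : Claim_equal_doublons_contexte := by
  intro liste_contexte nb doublons _
  show doublons_contexte liste_contexte nb doublons = doublons_contexte_alt liste_contexte nb doublons
  unfold doublons_contexte doublons_contexte_alt
  have hfold :
      liste_contexte.foldl
        (fun (st : PySem.Dict String (PySem.Dict Int String) × Int) elem =>
          let p := (PySem.Str.split₀ elem).foldl pvScanA ([], false)
          let terme := PySem.Str.strip (PySem.Str.join " " p.1)
          if doublons.contains terme then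
            (if !(st.1.contains terme) then
               st.1.insert terme (PySem.Dict.empty.insert st.2 elem)
             else
               st.1.modify terme PySem.Dict.empty (fun dd => dd.insert st.2 elem),
             st.2 + 1)
          else st)
        (PySem.Dict.empty, 0) =
      liste_contexte.foldl
        (fun (st : PySem.Dict String (PySem.Dict Int String) × Int) elem =>
          let terme := PySem.Str.strip (PySem.Str.join " " (pvSkip (PySem.Str.split₀ elem)))
          if doublons.contains terme then
            ((st.1.setdefault terme PySem.Dict.empty).modify terme PySem.Dict.empty
               (fun dd => dd.insert st.2 elem),
             st.2 + 1)
          else st)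
        (PySem.Dict.empty, 0) := by
    apply PySem.List.foldl_congr_mem
    intro st elem _
    have hterm : ((PySem.Str.split₀ elem).foldl pvScanA ([], false)).1 =
        pvSkip (PySem.Str.split₀ elem) := by
      simpa using scan_eq_skip_take (PySem.Str.split₀ elem) [] false
    simp only [hterm, dict_step_eq]
  rw [hfold]
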